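-- pv_equiv track=rewrite | github.com/buggex/StreamController-SoundboardPlugin | helpers/PulseHelpers.py | filter_proplist
-- ===== SOURCE A (Python) =====
-- def filter_proplist(proplist) -> str | None:
--     filters: list[str] = [
--         "alsa.card_name",
--         "alsa.long_card_name",
--         "node.name",
--         "node.nick",
--         "device.name",
--         "device.nick",
--         "device.description",
--         "device.serial"
--     ]
--
--     weights: list[(str, int)] = [
--         ('.', -50),
--         ('_', -10),
--         (':', -25),
--         (';', -100),
--         ('-', -5)
--     ]
--
--     length_weight: int = -5
--
--     minimal_weights: list[(int, str)] = []
--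
--     for filter in filters:
--         out: str = proplist.get(filter)
--
--         if out is None or len(out) < 3:
--             continue
--         current_weight: int = 0
--
--         current_weight += sum(out.count(weight[0]) * weight[1] for weight in weights)
--         current_weight += (len(out) * length_weight)
--
--         minimal_weights.append((current_weight, out))
--
--     minimal_weights.sort(key=lambda x: x[0], reverse=True)
--
--     if len(minimal_weights) > 0:
--         return minimal_weights[0][1] or None
--     return None
-- ===== SOURCE B (Python) =====
-- def filter_proplist(proplist) -> str | None:
--     filters: list[str] = [
--         "alsa.card_name",
--         "alsa.long_card_name",
--         "node.name",
--         "node.nick",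
--         "device.name",
--         "device.nick",
--         "device.description",
--         "device.serial"
--     ]
--
--     weights: list[(str, int)] = [
--         ('.', -50),
--         ('_', -10),
--         (':', -25),
--         (';', -100),
--         ('-', -5)
--     ]
--
--     length_weight: int = -5
--
--     best = None  # (weight, out) of the best candidate seen so far
--
--     for filter in filters:
--         out = proplist.get(filter)
--         if out is None or len(out) < 3:
--             continue
--         w = sum(out.count(c) * v for c, v in weights) + len(out) * length_weight
--         if best is None or best[0] < w:
--             best = (w, out)
--
--     return best[1] if best is not None else None
-- ===== Notes on version B (the rewrite author's own statement) =====
-- stated objective: simpler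
-- what changed: Replaces the build-a-list-then-stable-reverse-sort-and-take-head pattern with a single running-best accumulator (strict > keeps the earliest filter on weight ties, matching the stable sort), removing the intermediate list and the sort.
import Mathlib
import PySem

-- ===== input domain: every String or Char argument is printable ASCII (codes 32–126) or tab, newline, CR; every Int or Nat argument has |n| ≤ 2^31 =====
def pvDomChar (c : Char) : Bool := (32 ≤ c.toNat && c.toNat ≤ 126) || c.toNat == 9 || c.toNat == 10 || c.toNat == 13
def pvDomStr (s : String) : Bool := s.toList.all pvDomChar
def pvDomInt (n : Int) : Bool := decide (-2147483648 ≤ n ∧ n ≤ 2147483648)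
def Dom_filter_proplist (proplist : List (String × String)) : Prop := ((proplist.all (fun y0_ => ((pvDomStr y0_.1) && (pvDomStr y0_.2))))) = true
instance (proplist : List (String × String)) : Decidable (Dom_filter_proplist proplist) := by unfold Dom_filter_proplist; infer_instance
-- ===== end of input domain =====

-- B replaces A's build-list / stable-reverse-sort / take-head pattern with a single
-- running-best accumulator (strict > keeps the earliest filter on ties); objective: simpler.


-- shared module-level tables (identical literals in both Pythons) and the dict lookup
-- proplist.get(k): first match in the association list, None if absent
def pvGet (proplist : List (String × String)) (k : String) : Option String :=
  (proplist.find? (fun q => q.1 == k)).map (·.2)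

def pvFilters : List String :=
  ["alsa.card_name", "alsa.long_card_name", "node.name", "node.nick",
   "device.name", "device.nick", "device.description", "device.serial"]

def pvWeights : List (String × Int) :=
  [(".", -50), ("_", -10), (":", -25), (";", -100), ("-", -5)]

-- ===== PORT A =====
def filter_proplist (proplist : List (String × String)) : Option String :=
  let minimal_weights : List (Int × String) :=
    pvFilters.foldl (fun acc filt =>
      match pvGet proplist filt with
      | none => acc
      | some out =>
        if PySem.Str.len out < 3 then acc
        else
          let current_weight : Int :=
            0 + (pvWeights.map (fun w => (PySem.Str.count out w.1 : Int) * w.2)).sum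
              + PySem.Str.len out * (-5)
          acc ++ [(current_weight, out)]) []
  let sortedW := PySem.List.sorted minimal_weights (fun x => x.1) true
  match sortedW with
  | [] => none
  | m :: _ => if m.2 == "" then none else some m.2   -- `minimal_weights[0][1] or None`

-- ===== PORT B =====
def filter_proplist_alt (proplist : List (String × String)) : Option String :=
  let best : Option (Int × String) :=
    pvFilters.foldl (fun best filt =>
      match pvGet proplist filt with
      | none => best
      | some out =>
        if PySem.Str.len out < 3 then best
        else
          let w : Int :=
            (pvWeights.map (fun p => (PySem.Str.count out p.1 : Int) * p.2)).sum
              + PySem.Str.len out * (-5)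
          match best with
          | none => some (w, out)
          | some b => if b.1 < w then some (w, out) else best) none
  best.map (·.2)

-- ===== PRECONDITION & SPEC =====
def Spec_filter_proplist (proplist : List (String × String)) (out : Option String) : Prop := out = filter_proplist_alt proplist
instance (proplist : List (String × String)) (out : Option String) : Decidable (Spec_filter_proplist proplist out) := by unfold Spec_filter_proplist; infer_instance

-- ===== CLAIM (what is proved, stated in full; the proofs are below) =====
def Claim_equal_filter_proplist : Prop := ∀ (proplist : List (String × String)), Dom_filter_proplist proplist → Spec_filter_proplist proplist (filter_proplist proplist)

-- ===== LEMMAS AND PROOFS =====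

-- the weight A and B both compute for a qualifying string
def pvW (out : String) : Int :=
  (pvWeights.map (fun w => (PySem.Str.count out w.1 : Int) * w.2)).sum + PySem.Str.len out * (-5)

-- the qualifying (weight, out) pairs, in filter order
def pvEntries (proplist : List (String × String)) : List String → List (Int × String)
  | [] => []
  | f :: fs =>
    match pvGet proplist f with
    | none => pvEntries proplist fs
    | some out =>
      if PySem.Str.len out < 3 then pvEntries proplist fs
      else (pvW out, out) :: pvEntries proplist fs

-- the running-best step of B, over already-qualified pairs
def pvStep (b : Option (Int × String)) (x : Int × String) : Option (Int × String) :=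
  match b with
  | none => some x
  | some q => if q.1 < x.1 then some x else some q

lemma pvA_foldl (proplist : List (String × String)) :
    ∀ (fs : List String) (acc : List (Int × String)),
      fs.foldl (fun acc filt =>
        match pvGet proplist filt with
        | none => acc
        | some out =>
          if PySem.Str.len out < 3 then acc
          else
            let current_weight : Int :=
              0 + (pvWeights.map (fun w => (PySem.Str.count out w.1 : Int) * w.2)).sum
                + PySem.Str.len out * (-5)
            acc ++ [(current_weight, out)]) acc
      = acc ++ pvEntries proplist fs := by
  intro fs
  induction fs with
  | nil => intro acc; simp [pvEntries]
  | cons f fs ih =>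
    intro acc
    simp only [List.foldl_cons, pvEntries]
    cases h : pvGet proplist f with
    | none => exact ih acc
    | some out =>
      by_cases hl : PySem.Str.len out < 3
      · dsimp only; rw [if_pos hl, if_pos hl]; exact ih acc
      · dsimp only; rw [if_neg hl, if_neg hl, ih]
        simp [pvW, zero_add]

lemma pvB_foldl (proplist : List (String × String)) :
    ∀ (fs : List String) (b : Option (Int × String)),
      fs.foldl (fun best filt =>
        match pvGet proplist filt with
        | none => best
        | some out =>
          if PySem.Str.len out < 3 then best
          else
            let w : Int :=
              (pvWeights.map (fun p => (PySem.Str.count out p.1 : Int) * p.2)).sum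
                + PySem.Str.len out * (-5)
            match best with
            | none => some (w, out)
            | some q => if q.1 < w then some (w, out) else best) b
      = (pvEntries proplist fs).foldl pvStep b := by
  intro fs
  induction fs with
  | nil => intro b; simp [pvEntries]
  | cons f fs ih =>
    intro b
    simp only [List.foldl_cons, pvEntries]
    cases h : pvGet proplist f with
    | none => exact ih b
    | some out =>
      by_cases hl : PySem.Str.len out < 3
      · dsimp only; rw [if_pos hl, if_pos hl]; exact ih b
      · dsimp only; rw [if_neg hl, if_neg hl, List.foldl_cons]
        cases b with
        | none => rw [ih]; rfl
        | some q =>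
          show _ = List.foldl pvStep (pvStep (some q) (pvW out, out)) _
          unfold pvStep pvW
          dsimp only
          by_cases hq : q.1 < (pvWeights.map (fun p => (PySem.Str.count out p.1 : Int) * p.2)).sum + PySem.Str.len out * (-5)
          · rw [if_pos hq]; exact ih _
          · rw [if_neg hq]; exact ih _

-- head of the stable descending insertion sort = running strict-max fold
lemma pvHead_foldl_insertBy :
    ∀ (l acc : List (Int × String)),
      (l.foldl (fun acc x =>
          PySem.List.insertBy (fun a b => decide ((fun x : Int × String => x.1) b < (fun x : Int × String => x.1) a)) x acc) acc).head?
      = l.foldl pvStep acc.head? := by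
  intro l
  induction l with
  | nil => intro acc; rfl
  | cons x xs ih =>
    intro acc
    simp only [List.foldl_cons, ih]
    congr 1
    cases acc with
    | nil => rfl
    | cons y ys =>
      by_cases h : y.1 < x.1 <;> simp [PySem.List.insertBy, pvStep, h]

lemma pvHead_sorted (l : List (Int × String)) :
    (PySem.List.sorted l (fun x => x.1) true).head? = l.foldl pvStep none := by
  rw [PySem.List.sorted_rev_eq_foldl_insertBy]
  simpa using pvHead_foldl_insertBy l []

lemma pvEntries_ne_empty (proplist : List (String × String)) :
    ∀ (fs : List String), ∀ x ∈ pvEntries proplist fs, x.2 ≠ "" := by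
  intro fs
  induction fs with
  | nil => simp [pvEntries]
  | cons f fs ih =>
    simp only [pvEntries]
    cases h : pvGet proplist f with
    | none => exact ih
    | some out =>
      by_cases hl : PySem.Str.len out < 3
      · dsimp only; rw [if_pos hl]; exact ih
      · dsimp only; rw [if_neg hl]
        intro x hx
        rcases List.mem_cons.mp hx with rfl | hx'
        · show out ≠ ""
          intro habs
          rw [habs] at hl
          exact hl (by decide)
        · exact ih x hx'

-- ===== VERDICT (by name: the statement is the Claim_ definition above) =====
theorem filter_proplist_spec : Claim_equal_filter_proplist := by
  intro proplist _
  unfold Spec_filter_proplist filter_proplist filter_proplist_alt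
  rw [pvA_foldl proplist pvFilters [], pvB_foldl proplist pvFilters]
  simp only [List.nil_append]
  cases hs : PySem.List.sorted (pvEntries proplist pvFilters) (fun x => x.1) true with
  | nil =>
    have : pvEntries proplist pvFilters = [] := (PySem.List.sorted_eq_nil_iff _ _ _).mp hs
    simp [this, List.foldl_nil]
  | cons m t =>
    have hhead : (pvEntries proplist pvFilters).foldl pvStep none = some m := by
      rw [← pvHead_sorted, hs]; rfl
    have hm : m ∈ pvEntries proplist pvFilters := by
      have : m ∈ PySem.List.sorted (pvEntries proplist pvFilters) (fun x => x.1) true := by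
        rw [hs]; exact List.mem_cons_self
      exact (PySem.List.mem_sorted _ _ _ _).mp this
    have hne : m.2 ≠ "" := pvEntries_ne_empty proplist pvFilters m hm
    rw [hhead]
    simp [hne]
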